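-- pv_equiv track=rewrite | github.com/zinebfadili/stream-routing-metaheuristics | constraint-programming/modelisation.py | get_last_links
-- ===== SOURCE A (Python) =====
-- def get_last_links(links, streams):
--     last_links = [[] for _ in range(len(streams))]
--     non_last_links = [[] for _ in range(len(streams))]
--     for idx_link, link in enumerate(links):
--         for idx_stream, stream in enumerate(streams):
--             if stream[1] == link[1]:
--                 last_links[idx_stream].append(idx_link)
--             else:
--                 non_last_links[idx_stream].append(idx_link)
--     return last_links, non_last_links
-- ===== SOURCE B (Python) =====
-- def get_last_links(links, streams):
--     # Build, once per distinct stream destination, the split of link indices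
--     # into (matching-destination, other-destination); then copy per stream.
--     if not links:
--         # no links: every partition is empty, no index to build
--         return [[] for _ in streams], [[] for _ in streams]
--     groups = {}
--     for stream in streams:
--         d = stream[1]
--         if d not in groups:
--             la, nl = [], []
--             for i, link in enumerate(links):
--                 (la if link[1] == d else nl).append(i)
--             groups[d] = (la, nl)
--     last_links, non_last_links = [], []
--     for stream in streams:
--         la, nl = groups[stream[1]]
--         last_links.append(list(la))
--         non_last_links.append(list(nl))
--     return last_links, non_last_links
-- ===== Notes on version B (the rewrite author's own statement) =====
-- stated objective: alternative
-- what changed: Instead of A's nested loop over every (link, stream) pair updating per-stream slots in place, B builds a dict keyed by destination once (one link scan per DISTINCT destination) and then copies the grouped index lists into per-stream outputs; the empty-links case is returned directly.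
import Mathlib
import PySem

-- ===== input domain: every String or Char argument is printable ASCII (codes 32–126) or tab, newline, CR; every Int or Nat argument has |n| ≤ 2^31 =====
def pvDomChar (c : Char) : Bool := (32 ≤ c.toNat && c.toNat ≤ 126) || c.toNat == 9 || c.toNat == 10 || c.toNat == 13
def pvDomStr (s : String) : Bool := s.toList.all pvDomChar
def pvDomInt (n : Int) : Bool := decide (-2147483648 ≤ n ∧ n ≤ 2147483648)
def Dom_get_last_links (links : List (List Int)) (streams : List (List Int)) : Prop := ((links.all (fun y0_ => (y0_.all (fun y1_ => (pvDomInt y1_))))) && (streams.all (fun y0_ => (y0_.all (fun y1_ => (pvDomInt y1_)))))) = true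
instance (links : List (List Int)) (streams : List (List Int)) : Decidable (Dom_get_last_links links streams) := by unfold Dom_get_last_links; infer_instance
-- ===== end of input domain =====

-- B replaces A's nested per-(link,stream) loop by a dict keyed by destination,
-- filled once per distinct destination and then copied into per-stream slots,
-- returning the all-empty partitions directly when there are no links
-- (objective: alternative decomposition; same return values, proved below).

-- x[1] of a row; both Pythons only reach it where it exists (Pre_), so the
-- total default form is exact on the admitted inputs.
def pvKey (l : List Int) : Int := PySem.List.pyGetD l 1 0

-- ===== PORT A =====
def get_last_links (links : List (List Int)) (streams : List (List Int)) : List (List Int) × List (List Int) :=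
  -- last_links / non_last_links = [[] for _ in range(len(streams))]
  -- for idx_link, link in enumerate(links): for idx_stream, stream in enumerate(streams): append idx_link
  (PySem.List.enumerate links 0).foldl
    (fun (st : List (List Int) × List (List Int)) (p : Int × List Int) =>
      (PySem.List.enumerate streams 0).foldl
        (fun (st2 : List (List Int) × List (List Int)) (q : Int × List Int) =>
          if pvKey q.2 = pvKey p.2 then
            (st2.1.modify q.1.toNat (fun l => l ++ [p.1]), st2.2)  -- idx_stream ≥ 0, so toNat is exact
          else
            (st2.1, st2.2.modify q.1.toNat (fun l => l ++ [p.1])))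
        st)
    (streams.map (fun _ => ([] : List Int)), streams.map (fun _ => ([] : List Int)))

-- ===== PORT B =====
-- inner loop of Source B: split the link indices by "link[1] == d"
def pvGrpFold (links : List (List Int)) (d : Int) : List Int × List Int :=
  (PySem.List.enumerate links 0).foldl
    (fun (acc : List Int × List Int) (q : Int × List Int) =>
      if pvKey q.2 = d then (acc.1 ++ [q.1], acc.2) else (acc.1, acc.2 ++ [q.1]))
    ([], [])

def get_last_links_alt (links : List (List Int)) (streams : List (List Int)) : List (List Int) × List (List Int) :=
  if links = [] then
    -- no links: every partition is empty, no index to build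
    (streams.map (fun _ => ([] : List Int)), streams.map (fun _ => ([] : List Int)))
  else
    let groups : PySem.Dict Int (List Int × List Int) :=
      streams.foldl
        (fun g s => if g.contains (pvKey s) then g else g.insert (pvKey s) (pvGrpFold links (pvKey s)))
        PySem.Dict.empty
    -- groups[stream[1]]: the key was inserted by the first loop, so getD never takes its default
    streams.foldl
      (fun (acc : List (List Int) × List (List Int)) s =>
        let p := groups.getD (pvKey s) ([], [])
        (acc.1 ++ [p.1], acc.2 ++ [p.2]))
      ([], [])

-- ===== PRECONDITION & SPEC =====
-- Pre_ holds exactly where A returns normally: A raises IndexError iff both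
-- lists are nonempty and some row (link or stream) has length < 2, since it
-- reads stream[1] and link[1] on every (link, stream) pair.
def Pre_get_last_links (links : List (List Int)) (streams : List (List Int)) : Prop :=
  links = [] ∨ streams = [] ∨ ((∀ s ∈ streams, 2 ≤ s.length) ∧ (∀ l ∈ links, 2 ≤ l.length))
instance (links : List (List Int)) (streams : List (List Int)) : Decidable (Pre_get_last_links links streams) := by unfold Pre_get_last_links; infer_instance

def pvWitness_get_last_links : List (List Int) × List (List Int) := ([[0, 1], [2, 3]], [[5, 3], [6, 1], [7, 3]])

def Spec_get_last_links (links : List (List Int)) (streams : List (List Int)) (out : List (List Int) × List (List Int)) : Prop := out = get_last_links_alt links streams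
instance (links : List (List Int)) (streams : List (List Int)) (out : List (List Int) × List (List Int)) : Decidable (Spec_get_last_links links streams out) := by unfold Spec_get_last_links; infer_instance

-- ===== CLAIM (what is proved, stated in full; the proofs are below) =====
def Claim_equal_get_last_links : Prop := ∀ (links : List (List Int)) (streams : List (List Int)), Dom_get_last_links links streams → Pre_get_last_links links streams → Spec_get_last_links links streams (get_last_links links streams)

-- ===== LEMMAS AND PROOFS =====

-- closed form of the per-destination split of link indices, starting at index i
def pvGrpC (links : List (List Int)) (i d : Int) : List Int × List Int :=
  match links with
  | [] => ([], [])
  | l :: t =>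
    let r := pvGrpC t (i + 1) d
    if pvKey l = d then (i :: r.1, r.2) else (r.1, i :: r.2)

lemma pvGrpFold_aux (d : Int) : ∀ (links : List (List Int)) (i : Int) (a b : List Int),
    (PySem.List.enumerate links i).foldl
      (fun (acc : List Int × List Int) (q : Int × List Int) =>
        if pvKey q.2 = d then (acc.1 ++ [q.1], acc.2) else (acc.1, acc.2 ++ [q.1]))
      (a, b)
    = (a ++ (pvGrpC links i d).1, b ++ (pvGrpC links i d).2) := by
  intro links
  induction links with
  | nil => intro i a b; simp [PySem.List.enumerate_nil, pvGrpC]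
  | cons l t ih =>
    intro i a b
    rw [PySem.List.enumerate_cons]
    simp only [List.foldl_cons, pvGrpC]
    by_cases h : pvKey l = d <;> simp [h, ih (i + 1)]

lemma pvGrpFold_eq (links : List (List Int)) (d : Int) :
    pvGrpFold links d = pvGrpC links 0 d := by
  simpa using pvGrpFold_aux d links 0 [] []

lemma modify_at_length {α : Type} (f : α → α) : ∀ (ll : List α) (x : α) (t : List α) (n : Nat),
    n = ll.length → (ll ++ x :: t).modify n f = ll ++ f x :: t := by
  intro ll
  induction ll with
  | nil => intro x t n hn; subst hn; simp [List.modify]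
  | cons a l ih =>
    intro x t n hn
    subst hn
    have := ih x t l.length rfl
    simp only [List.cons_append, List.length_cons, List.modify] at this ⊢
    simp [this]

-- one outer iteration of A (link lnk at index i): every stream slot gets i
-- appended on the matching side
lemma innerA (lnk : List Int) (i : Int) : ∀ (streams : List (List Int))
    (ll nl L N : List (List Int)), ll.length = nl.length →
    L.length = streams.length → N.length = streams.length →
    (PySem.List.enumerate streams (ll.length : Int)).foldl
      (fun (st2 : List (List Int) × List (List Int)) (q : Int × List Int) =>
        if pvKey q.2 = pvKey lnk then
          (st2.1.modify q.1.toNat (fun l => l ++ [i]), st2.2)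
        else
          (st2.1, st2.2.modify q.1.toNat (fun l => l ++ [i])))
      (ll ++ L, nl ++ N)
    = (ll ++ ((streams.zip L).map (fun sl => if pvKey sl.1 = pvKey lnk then sl.2 ++ [i] else sl.2)),
       nl ++ ((streams.zip N).map (fun sl => if pvKey sl.1 = pvKey lnk then sl.2 else sl.2 ++ [i]))) := by
  intro streams
  induction streams with
  | nil =>
    intro ll nl L N hln hL hN
    obtain rfl : L = [] := List.eq_nil_of_length_eq_zero (by simpa using hL)
    obtain rfl : N = [] := List.eq_nil_of_length_eq_zero (by simpa using hN)
    simp [PySem.List.enumerate_nil]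
  | cons s t ih =>
    intro ll nl L N hln hL hN
    cases L with
    | nil => simp at hL
    | cons L0 L' =>
      cases N with
      | nil => simp at hN
      | cons N0 N' =>
        rw [PySem.List.enumerate_cons]
        simp only [List.foldl_cons, List.zip_cons_cons, List.map_cons, Int.toNat_natCast]
        by_cases h : pvKey s = pvKey lnk
        · simp only [if_pos h]
          rw [modify_at_length _ ll L0 L' ll.length rfl]
          have hrec := ih (ll ++ [L0 ++ [i]]) (nl ++ [N0]) L' N'
            (by simp [hln]) (by simpa using hL) (by simpa using hN)
          simp only [List.length_append, List.length_singleton, Nat.cast_add, Nat.cast_one,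
            List.append_assoc, List.singleton_append] at hrec
          simpa using hrec
        · simp only [if_neg h]
          rw [modify_at_length _ nl N0 N' ll.length hln]
          have hrec := ih (ll ++ [L0]) (nl ++ [N0 ++ [i]]) L' N'
            (by simp [hln]) (by simpa using hL) (by simpa using hN)
          simp only [List.length_append, List.length_singleton, Nat.cast_add, Nat.cast_one,
            List.append_assoc, List.singleton_append] at hrec
          simpa using hrec

lemma zip_self_map {α β γ : Type} (l : List α) (f : α → β) (h : α → β → γ) :
    (l.zip (l.map f)).map (fun p => h p.1 p.2) = l.map (fun a => h a (f a)) := by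
  induction l with
  | nil => rfl
  | cons a t ih => simp [ih]

lemma outerA (streams : List (List Int)) : ∀ (links : List (List Int)) (i : Int)
    (f g : List Int → List Int),
    (PySem.List.enumerate links i).foldl
      (fun (st : List (List Int) × List (List Int)) (p : Int × List Int) =>
        (PySem.List.enumerate streams 0).foldl
          (fun (st2 : List (List Int) × List (List Int)) (q : Int × List Int) =>
            if pvKey q.2 = pvKey p.2 then
              (st2.1.modify q.1.toNat (fun l => l ++ [p.1]), st2.2)
            else
              (st2.1, st2.2.modify q.1.toNat (fun l => l ++ [p.1])))
          st)
      (streams.map f, streams.map g)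
    = (streams.map (fun s => f s ++ (pvGrpC links i (pvKey s)).1),
       streams.map (fun s => g s ++ (pvGrpC links i (pvKey s)).2)) := by
  intro links
  induction links with
  | nil => intro i f g; simp [PySem.List.enumerate_nil, pvGrpC]
  | cons l t ih =>
    intro i f g
    rw [PySem.List.enumerate_cons]
    simp only [List.foldl_cons]
    have hinner := innerA l i streams [] [] (streams.map f) (streams.map g)
      rfl (by simp) (by simp)
    simp only [List.length_nil, Nat.cast_zero, List.nil_append] at hinner
    rw [hinner, zip_self_map streams f (fun s x => if pvKey s = pvKey l then x ++ [i] else x),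
        zip_self_map streams g (fun s x => if pvKey s = pvKey l then x else x ++ [i]),
        ih (i + 1) (fun s => if pvKey s = pvKey l then f s ++ [i] else f s)
                   (fun s => if pvKey s = pvKey l then g s else g s ++ [i])]
    refine Prod.ext ?_ ?_ <;>
    · refine List.map_congr_left ?_
      intro s _
      simp only [pvGrpC]
      by_cases h : pvKey s = pvKey l
      · simp [h, List.append_assoc]
      · have h' : ¬ pvKey l = pvKey s := fun hh => h hh.symm
        simp [h, h']

-- A equals the closed form
lemma A_closed (links streams : List (List Int)) :
    get_last_links links streams
    = (streams.map (fun s => (pvGrpC links 0 (pvKey s)).1),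
       streams.map (fun s => (pvGrpC links 0 (pvKey s)).2)) := by
  unfold get_last_links
  simpa using outerA streams links 0 (fun _ => []) (fun _ => [])

-- once a key is in the dict, B's build loop keeps it
lemma contains_foldl_mono (links : List (List Int)) : ∀ (streams : List (List Int))
    (g : PySem.Dict Int (List Int × List Int)) (d : Int), g.contains d = true →
    (streams.foldl
      (fun g s => if g.contains (pvKey s) then g else g.insert (pvKey s) (pvGrpFold links (pvKey s)))
      g).contains d = true := by
  intro streams
  induction streams with
  | nil => intro g d h; simpa using h
  | cons s t ih =>
    intro g d h
    simp only [List.foldl_cons]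
    by_cases hc : g.contains (pvKey s) = true
    · rw [if_pos hc]; exact ih g d h
    · rw [if_neg hc]
      exact ih _ d (by rw [PySem.Dict.contains_insert]; simp [h])

-- B's dict answers pvGrpFold on every key it holds, and holds every stream key
lemma groups_spec (links : List (List Int)) : ∀ (streams : List (List Int))
    (g : PySem.Dict Int (List Int × List Int)),
    (∀ d, g.contains d = true → g.getD d ([], []) = pvGrpFold links d) →
    ∀ d,
      ((streams.foldl
          (fun g s => if g.contains (pvKey s) then g else g.insert (pvKey s) (pvGrpFold links (pvKey s)))
          g).contains d = true →
        (streams.foldl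
          (fun g s => if g.contains (pvKey s) then g else g.insert (pvKey s) (pvGrpFold links (pvKey s)))
          g).getD d ([], []) = pvGrpFold links d) ∧
      (d ∈ streams.map pvKey →
        (streams.foldl
          (fun g s => if g.contains (pvKey s) then g else g.insert (pvKey s) (pvGrpFold links (pvKey s)))
          g).contains d = true) := by
  intro streams
  induction streams with
  | nil => intro g hg d; exact ⟨hg d, by simp⟩
  | cons s t ih =>
    intro g hg d
    simp only [List.foldl_cons, List.map_cons, List.mem_cons]
    by_cases hc : g.contains (pvKey s) = true
    · rw [if_pos hc]
      refine ⟨(ih g hg d).1, fun hd => ?_⟩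
      rcases hd with rfl | hd
      · exact contains_foldl_mono links t g _ hc
      · exact (ih g hg d).2 hd
    · rw [if_neg hc]
      have hg' : ∀ d', (g.insert (pvKey s) (pvGrpFold links (pvKey s))).contains d' = true →
          (g.insert (pvKey s) (pvGrpFold links (pvKey s))).getD d' ([], []) = pvGrpFold links d' := by
        intro d' hd'
        rw [PySem.Dict.getD_insert]
        by_cases h : d' = pvKey s
        · simp [h]
        · rw [if_neg h]
          apply hg
          rw [PySem.Dict.contains_insert] at hd'
          simpa [show (d' == pvKey s) = false by simpa using h] using hd'
      refine ⟨(ih _ hg' d).1, fun hd => ?_⟩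
      rcases hd with rfl | hd
      · exact contains_foldl_mono links t _ _ (PySem.Dict.contains_insert_self _ _ _)
      · exact (ih _ hg' d).2 hd

lemma foldl_append_pair {α : Type} (f1 f2 : α → List Int) : ∀ (ss : List α) (a b : List (List Int)),
    ss.foldl (fun (acc : List (List Int) × List (List Int)) s => (acc.1 ++ [f1 s], acc.2 ++ [f2 s])) (a, b)
    = (a ++ ss.map f1, b ++ ss.map f2) := by
  intro ss
  induction ss with
  | nil => intro a b; simp
  | cons s t ih => intro a b; simp [ih, List.append_assoc]

-- B equals the closed form
lemma B_closed (links streams : List (List Int)) :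
    get_last_links_alt links streams
    = (streams.map (fun s => (pvGrpC links 0 (pvKey s)).1),
       streams.map (fun s => (pvGrpC links 0 (pvKey s)).2)) := by
  unfold get_last_links_alt
  by_cases hl : links = []
  · subst hl; simp [pvGrpC]
  · rw [if_neg hl]
    have hempty : ∀ d, (PySem.Dict.empty : PySem.Dict Int (List Int × List Int)).contains d = true →
        (PySem.Dict.empty : PySem.Dict Int (List Int × List Int)).getD d ([], []) = pvGrpFold links d := by
      intro d h; simp [PySem.Dict.contains_empty] at h
    set G := streams.foldl
        (fun g s => if g.contains (pvKey s) then g else g.insert (pvKey s) (pvGrpFold links (pvKey s)))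
        PySem.Dict.empty with hG
    have hget : ∀ s ∈ streams, G.getD (pvKey s) ([], []) = pvGrpC links 0 (pvKey s) := by
      intro s hs
      have h := groups_spec links streams PySem.Dict.empty hempty (pvKey s)
      rw [hG]
      rw [← pvGrpFold_eq]
      exact h.1 (h.2 (List.mem_map_of_mem hs))
    rw [foldl_append_pair (fun s => (G.getD (pvKey s) ([], [])).1) (fun s => (G.getD (pvKey s) ([], [])).2) streams [] []]
    simp only [List.nil_append]
    exact Prod.ext
      (List.map_congr_left fun s hs => by rw [hget s hs])
      (List.map_congr_left fun s hs => by rw [hget s hs])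

-- ===== VERDICT (by name: the statement is the Claim_ definition above) =====
theorem get_last_links_spec : Claim_equal_get_last_links := by
  intro links streams _ _
  unfold Spec_get_last_links
  rw [A_closed, B_closed]
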